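-- pv_equiv track=rewrite | github.com/Ryles1/AdventofCode | 2015/day8_2015.py | part2
-- ===== SOURCE A (Python) =====
-- def count_encoded_characters(s):
--     length = 2  # account for starting and ending "
--     i = 0
--     s = s.strip()
--     while i < len(s):
--         if s[i] == '"':
--             length += 2  # add \ before every "
--             i += 1
--         elif s[i] == '\\':
--             length += 2  # add \ before every \
--             i += 1
--         else:
--             length += 1
--             i += 1
--     return length
--
-- def part2(lines):
--     code_total_length = 0
--     encoded_total_characters = 0
--     for line in lines:
--         code_total_length += len(line.strip())
--         encoded_total_characters += count_encoded_characters(line)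
--     answer = encoded_total_characters - code_total_length
--     return answer
-- ===== SOURCE B (Python) =====
-- def part2(lines):
--     # encoded_len - code_len per line = 2 + (#quotes) + (#backslashes): every other char cancels.
--     answer = 0
--     for line in lines:
--         t = line.strip()
--         answer += 2 + t.count('"') + t.count('\\')
--     return answer
-- ===== Notes on version B (the rewrite author's own statement) =====
-- stated objective: simpler
-- what changed: B never computes the encoded or code lengths: per line it adds 2 plus the counts of '"' and '\' via str.count (the per-line difference in closed form), eliminating A's character-by-character encoding helper.
import Mathlib
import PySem

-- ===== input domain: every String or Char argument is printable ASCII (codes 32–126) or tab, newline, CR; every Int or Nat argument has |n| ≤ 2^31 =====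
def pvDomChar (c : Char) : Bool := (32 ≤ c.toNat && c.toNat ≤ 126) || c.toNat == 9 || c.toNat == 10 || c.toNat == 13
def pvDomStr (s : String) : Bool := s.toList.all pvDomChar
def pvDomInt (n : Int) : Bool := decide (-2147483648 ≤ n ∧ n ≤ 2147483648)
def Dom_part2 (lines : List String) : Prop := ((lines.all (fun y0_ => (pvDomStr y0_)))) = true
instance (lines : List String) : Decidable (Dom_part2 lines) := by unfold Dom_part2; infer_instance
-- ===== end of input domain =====

-- B replaces A's character-by-character encoded-length helper by the closed-form per-line
-- difference 2 + count('"') + count('\\'); objective: simpler.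

-- ===== PORT A =====
-- while loop of count_encoded_characters, step for step over the stripped characters
def countEncAux : List Char → Int → Int
  | [], acc => acc
  | c :: rest, acc =>
    if c == '"' then countEncAux rest (acc + 2)
    else if c == '\\' then countEncAux rest (acc + 2)
    else countEncAux rest (acc + 1)

def countEncodedCharacters (s : String) : Int :=
  countEncAux (PySem.Str.strip s).toList 2

def part2 (lines : List String) : Int :=
  let p := lines.foldl
    (fun (acc : Int × Int) line =>
      (acc.1 + ((PySem.Str.strip line).toList.length : Int),
       acc.2 + countEncodedCharacters line))
    (0, 0)
  p.2 - p.1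

-- ===== PORT B =====
def part2_alt (lines : List String) : Int :=
  lines.foldl
    (fun acc line =>
      let t := PySem.Str.strip line
      acc + 2 + (PySem.Str.count t "\"" : Int) + (PySem.Str.count t "\\" : Int))
    0

-- ===== PRECONDITION & SPEC =====
def Spec_part2 (lines : List String) (out : Int) : Prop := out = part2_alt lines
instance (lines : List String) (out : Int) : Decidable (Spec_part2 lines out) := by unfold Spec_part2; infer_instance

-- ===== CLAIM (what is proved, stated in full; the proofs are below) =====
def Claim_equal_part2 : Prop := ∀ (lines : List String), Dom_part2 lines → Spec_part2 lines (part2 lines)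

-- ===== LEMMAS AND PROOFS =====

-- Python's t.count(c) for a one-character pattern is the character count
theorem chars_count_go_singleton (c : Char) (l : List Char) (fuel acc : Nat)
    (h : l.length ≤ fuel) :
    PySem.Chars.count.go [c] fuel l acc = acc + l.count c := by
  induction l generalizing fuel acc with
  | nil => cases fuel <;> simp [PySem.Chars.count.go]
  | cons x t ih =>
    cases fuel with
    | zero => simp at h
    | succ n =>
      simp only [PySem.Chars.count.go]
      by_cases hx : x = c
      · subst hx
        simp only [List.isPrefixOf, beq_self_eq_true, Bool.true_and, if_pos, List.length_cons,
          List.drop_succ_cons, List.count_cons_self, List.length_nil, List.drop_zero]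
        rw [ih n (acc + 1) (by simpa using h)]
        omega
      · have : ([c].isPrefixOf (x :: t)) = false := by
          simp [List.isPrefixOf, Ne.symm hx]
        rw [this]
        simp only [Bool.false_eq_true, if_neg, not_false_iff]
        rw [ih n acc (by simpa using h)]
        simp [List.count_cons, hx]

theorem chars_count_singleton (c : Char) (l : List Char) :
    PySem.Chars.count l [c] = l.count c := by
  simp [PySem.Chars.count, chars_count_go_singleton c l l.length 0 le_rfl]

-- characterisation of A's while loop
theorem countEncAux_eq (l : List Char) (acc : Int) :
    countEncAux l acc = acc + l.length + l.count '"' + l.count '\\' := by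
  induction l generalizing acc with
  | nil => simp [countEncAux]
  | cons x t ih =>
    simp only [countEncAux]
    by_cases h1 : x = '"'
    · subst h1
      rw [if_pos (by decide), ih]
      simp
      ring
    · by_cases h2 : x = '\\'
      · subst h2
        rw [if_neg (by decide), if_pos (by decide), ih]
        simp [h1]
        ring
      · rw [if_neg (by simp [h1]), if_neg (by simp [h2]), ih]
        simp [h1, h2]
        ring

-- fold invariant: A's pair fold vs B's single accumulator
theorem fold_eq (lines : List String) (code enc b : Int)
    (h : enc - code = b) :
    (lines.foldl
      (fun (acc : Int × Int) line =>
        (acc.1 + ((PySem.Str.strip line).toList.length : Int),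
         acc.2 + countEncodedCharacters line))
      (code, enc)).2 -
    (lines.foldl
      (fun (acc : Int × Int) line =>
        (acc.1 + ((PySem.Str.strip line).toList.length : Int),
         acc.2 + countEncodedCharacters line))
      (code, enc)).1 =
    lines.foldl
      (fun acc line =>
        let t := PySem.Str.strip line
        acc + 2 + (PySem.Str.count t "\"" : Int) + (PySem.Str.count t "\\" : Int))
      b := by
  induction lines generalizing code enc b with
  | nil => simpa using h
  | cons line rest ih =>
    simp only [List.foldl_cons]
    apply ih
    have hc : PySem.Str.count (PySem.Str.strip line) "\"" =
        ((PySem.Str.strip line).toList.count '"') := by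
      rw [PySem.Str.count_eq]
      exact chars_count_singleton '"' (PySem.Str.strip line).toList
    have hb : PySem.Str.count (PySem.Str.strip line) "\\" =
        ((PySem.Str.strip line).toList.count '\\') := by
      rw [PySem.Str.count_eq]
      exact chars_count_singleton '\\' (PySem.Str.strip line).toList
    simp only [countEncodedCharacters, countEncAux_eq, hc, hb]
    omega

-- ===== VERDICT (by name: the statement is the Claim_ definition above) =====
theorem part2_spec : Claim_equal_part2 := by
  intro lines _
  unfold Spec_part2 part2 part2_alt
  exact fold_eq lines 0 0 0 (by ring)
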